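-- pv_equiv track=rewrite | github.com/TwoYear98/JiYan | api/极验/极验四代文字点选/my_cryptio.py | get_jiami
-- ===== SOURCE A (Python) =====
-- def get_jiami(e):
--     t = [0] * len(e) * 2
--     n = 0
--     i = 0
--     while i < 2 * len(e):
--         t[i >> 3] |= int(e[n]) << (24 - i % 8 * 4)
--         n += 1
--         i += 2
--
--     r = []
--     s = 0
--     while s < len(e):
--         o = t[s >> 2] >> (24 - s % 4 * 8) & 255
--         r.append((o >> 4 & 15).to_bytes(1, byteorder="big").hex()[1:])
--         r.append((o & 15).to_bytes(1, byteorder="big").hex()[1:])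
--         s += 1
--
--     return "".join(r)
-- ===== SOURCE B (Python) =====
-- def get_jiami(e):
--     # One pass over chunks of four elements: build each 32-bit word directly
--     # and emit its bytes as two lowercase hex chars each; no preallocated array.
--     parts = []
--     i = 0
--     n = len(e)
--     while i < n:
--         chunk = e[i:i + 4]
--         word = 0
--         for m, v in enumerate(chunk):
--             word |= int(v) << (24 - 8 * m)
--         for j in range(len(chunk)):
--             parts.append(f"{(word >> (24 - 8 * j)) & 255:02x}")
--         i += 4
--     return "".join(parts)
-- ===== Notes on version B (the rewrite author's own statement) =====
-- stated objective: simpler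
-- what changed: Replaces the preallocated word array and the two index-stepping while loops (bit-pack into t, then read the bytes back out of t with per-byte to_bytes().hex() calls) with a single pass over four-element chunks that builds each 32-bit word locally and formats its bytes with %02x directly.
import Mathlib
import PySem

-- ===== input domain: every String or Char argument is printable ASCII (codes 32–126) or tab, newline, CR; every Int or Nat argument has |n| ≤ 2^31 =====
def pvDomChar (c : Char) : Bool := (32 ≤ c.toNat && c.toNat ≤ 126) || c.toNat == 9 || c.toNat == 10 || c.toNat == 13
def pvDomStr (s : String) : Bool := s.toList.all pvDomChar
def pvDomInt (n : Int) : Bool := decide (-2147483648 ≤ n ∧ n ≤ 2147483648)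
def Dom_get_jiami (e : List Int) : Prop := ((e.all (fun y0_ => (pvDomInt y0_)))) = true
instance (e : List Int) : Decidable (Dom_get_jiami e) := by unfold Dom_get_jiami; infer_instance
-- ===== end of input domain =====

-- B replaces A's preallocated word array and two while loops with one pass over
-- four-element chunks, formatting each byte as hex directly (objective: simpler).

-- ===== PORT A =====
-- (nib).to_bytes(1, "big").hex()[1:] — for nib in 0..15 this is exactly the lowercase hex digit
def pvHexA (n : Int) : Char := ("0123456789abcdef".toList).getD n.toNat '0'

-- first while loop: t[i >> 3] |= int(e[n]) << (24 - i % 8 * 4); n += 1; i += 2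
-- (all indices are provably in range when the loop condition holds, hence getD)
def pvBuild (e t : List Int) (n i : Nat) : List Int :=
  if h : i < 2 * e.length then
    pvBuild e (t.set (i >>> 3)
        (PySem.Int.bor (t.getD (i >>> 3) 0) ((e.getD n 0) <<< (24 - i % 8 * 4))))
      (n + 1) (i + 2)
  else t
termination_by 2 * e.length - i
decreasing_by omega

-- second while loop: o = t[s >> 2] >> (24 - s % 4 * 8) & 255; append both nibble chars
def pvRead (e t : List Int) (r : List Char) (s : Nat) : List Char :=
  if h : s < e.length then
    let o := PySem.Int.band ((t.getD (s >>> 2) 0) >>> (24 - s % 4 * 8)) 255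
    pvRead e t (r ++ [pvHexA (PySem.Int.band (o >>> (4 : Nat)) 15),
                      pvHexA (PySem.Int.band o 15)]) (s + 1)
  else r
termination_by e.length - s
decreasing_by omega

def get_jiami (e : List Int) : String :=
  String.ofList (pvRead e (pvBuild e (List.replicate (e.length * 2) 0) 0 0) [] 0)

-- ===== PORT B =====
-- f"{o:02x}" for 0 ≤ o < 256: two lowercase hex digits
def pvHexB (m : Nat) : Char := ("0123456789abcdef".toList).getD m '0'
def pvHex2 (o : Int) : List Char := [pvHexB (o.toNat / 16), pvHexB (o.toNat % 16)]

-- for m, v in enumerate(chunk): word |= int(v) << (24 - 8 * m)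
def pvChunkWord (c : List Int) (m : Nat) (acc : Int) : Int :=
  match c with
  | [] => acc
  | v :: cs => pvChunkWord cs (m + 1) (PySem.Int.bor acc (v <<< (24 - 8 * m)))

-- while i < n: chunk = e[i:i+4]; build the word; emit the chunk's bytes; i += 4
-- (e[i:i+4] with 0 ≤ i is exactly (e.drop i).take 4)
def pvAltLoop (e : List Int) (parts : List Char) (i : Nat) : List Char :=
  if h : i < e.length then
    let chunk := (e.drop i).take 4
    let word := pvChunkWord chunk 0 0
    pvAltLoop e
      (parts ++ (List.range chunk.length).flatMap
        (fun (j : Nat) => pvHex2 (PySem.Int.band (word >>> (24 - 8 * j)) 255)))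
      (i + 4)
  else parts
termination_by e.length - i
decreasing_by omega

def get_jiami_alt (e : List Int) : String := String.ofList (pvAltLoop e [] 0)

-- ===== PRECONDITION & SPEC =====
def Spec_get_jiami (e : List Int) (out : String) : Prop := out = get_jiami_alt e
instance (e : List Int) (out : String) : Decidable (Spec_get_jiami e out) := by unfold Spec_get_jiami; infer_instance

-- ===== CLAIM (what is proved, stated in full; the proofs are below) =====
def Claim_equal_get_jiami : Prop := ∀ (e : List Int), Dom_get_jiami e → Spec_get_jiami e (get_jiami e)

-- ===== LEMMAS AND PROOFS =====

-- ghost: the left-fold OR of contributions of e[n..stop) into their word, with Python's shifts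
def gW (e : List Int) (acc : Int) (n stop : Nat) : Int :=
  if h : n < stop then
    gW e (PySem.Int.bor acc ((e.getD n 0) <<< (24 - n % 4 * 8))) (n + 1) stop
  else acc
termination_by stop - n
decreasing_by omega

-- byte s of the final packed array, and A's character pair for it
def gByte (e : List Int) (s : Nat) : Int :=
  PySem.Int.band ((gW e 0 (4 * (s / 4)) (min e.length (4 * (s / 4) + 4))) >>> (24 - s % 4 * 8)) 255

def gPair (e : List Int) (s : Nat) : List Char :=
  [pvHexA (PySem.Int.band (gByte e s >>> (4 : Nat)) 15), pvHexA (PySem.Int.band (gByte e s) 15)]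

-- A's character pair read out of an arbitrary array t
def tPair (t : List Int) (u : Nat) : List Char :=
  let o := PySem.Int.band ((t.getD (u >>> 2) 0) >>> (24 - u % 4 * 8)) 255
  [pvHexA (PySem.Int.band (o >>> (4 : Nat)) 15), pvHexA (PySem.Int.band o 15)]

theorem gW_stop (e : List Int) (acc : Int) (n stop : Nat) (h : stop ≤ n) : gW e acc n stop = acc := by
  unfold gW; simp [Nat.not_lt.mpr h]

theorem pvBuild_getD (e : List Int) : ∀ fuel n t w, e.length - n ≤ fuel → t.length = 2 * e.length →
    (pvBuild e t n (2 * n)).getD w 0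
      = gW e (t.getD w 0) (max n (4 * w)) (min e.length (4 * w + 4)) := by
  intro fuel
  induction fuel with
  | zero =>
    intro n t w hf ht
    have hn : ¬ 2 * n < 2 * e.length := by omega
    unfold pvBuild
    rw [dif_neg hn, gW_stop e _ _ _ (by omega)]
  | succ fuel ih =>
    intro n t w hf ht
    by_cases h : n < e.length
    · have h2 : 2 * n < 2 * e.length := by omega
      have hk : (2 * n) >>> 3 = n / 4 := by simp [Nat.shiftRight_eq_div_pow]; omega
      have hsh : 24 - (2 * n) % 8 * 4 = 24 - n % 4 * 8 := by omega
      have h2n : 2 * n + 2 = 2 * (n + 1) := by ring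
      unfold pvBuild
      rw [dif_pos h2, hk, hsh, h2n,
        ih (n + 1) _ w (by omega) (by simpa using ht)]
      by_cases hw : w = n / 4
      · subst hw
        have hm1 : max n (4 * (n / 4)) = n := by omega
        have hm2 : max (n + 1) (4 * (n / 4)) = n + 1 := by omega
        have hlt : n < min e.length (4 * (n / 4) + 4) := by omega
        have hwl : n / 4 < t.length := by omega
        rw [hm1, hm2]
        conv_rhs => rw [gW]
        rw [dif_pos hlt]
        simp [List.getD, List.getElem?_set_self hwl]
      · have hacc : (t.set (n / 4) (PySem.Int.bor (t.getD (n / 4) 0)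
            (e.getD n 0 <<< (24 - n % 4 * 8)))).getD w 0 = t.getD w 0 := by
          simp [List.getD, List.getElem?_set_ne (Ne.symm hw)]
        rw [hacc]
        rcases Nat.lt_or_ge (n / 4) w with hlt | hge
        · have hm : max (n + 1) (4 * w) = 4 * w := by omega
          have hm' : max n (4 * w) = 4 * w := by omega
          rw [hm, hm']
        · have hs : min e.length (4 * w + 4) ≤ n := by omega
          rw [gW_stop e _ _ _ (by omega), gW_stop e _ _ _ (by omega)]
    · have hn : ¬ 2 * n < 2 * e.length := by omega
      unfold pvBuild
      rw [dif_neg hn, gW_stop e _ _ _ (by omega)]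

theorem pvRead_eq (e t : List Int) : ∀ fuel s r, e.length - s ≤ fuel →
    pvRead e t r s = r ++ (List.range' s (e.length - s)).flatMap (tPair t) := by
  intro fuel
  induction fuel with
  | zero =>
    intro s r hf
    have hs : ¬ s < e.length := by omega
    unfold pvRead
    rw [dif_neg hs]
    have : e.length - s = 0 := by omega
    simp [this]
  | succ fuel ih =>
    intro s r hf
    by_cases hs : s < e.length
    · unfold pvRead
      rw [dif_pos hs, ih (s + 1) _ (by omega)]
      have hc : e.length - s = (e.length - (s + 1)) + 1 := by omega
      rw [hc, List.range'_succ]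
      simp [tPair]
    · unfold pvRead
      rw [dif_neg hs]
      have : e.length - s = 0 := by omega
      simp [this]

theorem chunkWord_gW (e : List Int) : ∀ d p acc, p % 4 + d ≤ 4 →
    pvChunkWord ((e.drop p).take d) (p % 4) acc = gW e acc p (min (p + d) e.length) := by
  intro d
  induction d with
  | zero =>
    intro p acc _
    rw [gW_stop e _ _ _ (by omega)]
    simp [pvChunkWord]
  | succ d ih =>
    intro p acc hd
    by_cases hp : p < e.length
    · have hgd : e.getD p 0 = e[p] := by simp [List.getD, List.getElem?_eq_getElem hp]
      have hsh : 24 - 8 * (p % 4) = 24 - p % 4 * 8 := by omega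
      rw [List.drop_eq_getElem_cons hp, List.take_succ_cons]
      show pvChunkWord ((e.drop (p + 1)).take d) (p % 4 + 1)
          (PySem.Int.bor acc (e[p] <<< (24 - 8 * (p % 4)))) = _
      conv_rhs => rw [gW]
      rw [dif_pos (by omega : p < min (p + (d + 1)) e.length), hgd, hsh]
      cases d with
      | zero =>
        rw [gW_stop e _ _ _ (by omega)]
        simp [pvChunkWord]
      | succ k =>
        have hm : (p + 1) % 4 = p % 4 + 1 := by omega
        have := ih (p + 1) (PySem.Int.bor acc (e[p] <<< (24 - p % 4 * 8))) (by omega)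
        rw [hm] at this
        rw [this]
        have : p + 1 + (k + 1) = p + (k + 1 + 1) := by omega
        rw [this]
    · have h1 : e.drop p = [] := by
        simp [List.drop_eq_nil_iff]
        omega
      rw [h1, gW_stop e _ _ _ (by omega)]
      simp [pvChunkWord]

theorem byte_bounds (x : Int) : 0 ≤ PySem.Int.band x 255 ∧ PySem.Int.band x 255 < 256 := by
  unfold PySem.Int.band
  split_ifs with h1 h2 h2
  · have := Nat.and_le_right (n := x.toNat) (m := (255:Int).toNat)
    constructor
    · positivity
    · have h255 : (255:Int).toNat = 255 := by decide
      omega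
  · omega
  · have h255 : (255:Int).toNat = 255 := by decide
    constructor <;> omega
  · omega

set_option maxRecDepth 10000 in
theorem hex_nibbles : ∀ m : Nat, m < 256 →
    (PySem.Int.band ((m : Int) >>> (4 : Nat)) 15 = ((m / 16 : Nat) : Int)
      ∧ PySem.Int.band (m : Int) 15 = ((m % 16 : Nat) : Int)) := by decide

theorem hex_pair (m : Nat) (h : m < 256) :
    [pvHexA (PySem.Int.band ((m : Int) >>> (4 : Nat)) 15), pvHexA (PySem.Int.band (m : Int) 15)]
      = pvHex2 (m : Int) := by
  obtain ⟨h1, h2⟩ := hex_nibbles m h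
  rw [h1, h2]
  simp only [pvHexA, pvHexB, pvHex2, Int.toNat_natCast]

theorem altLoop_eq (e : List Int) : ∀ fuel k parts, e.length - 4 * k ≤ fuel →
    pvAltLoop e parts (4 * k)
      = parts ++ (List.range' (4 * k) (e.length - 4 * k)).flatMap (gPair e) := by
  intro fuel
  induction fuel with
  | zero =>
    intro k parts hf
    have hn : ¬ 4 * k < e.length := by omega
    have h0 : e.length - 4 * k = 0 := by omega
    unfold pvAltLoop
    rw [dif_neg hn, h0]
    simp
  | succ fuel ih =>
    intro k parts hf
    by_cases hlen : 4 * k < e.length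
    · have hmod : (4 * k) % 4 = 0 := by omega
      have hword : pvChunkWord ((e.drop (4 * k)).take 4) 0 0
          = gW e 0 (4 * k) (min (4 * k + 4) e.length) := by
        have := chunkWord_gW e 4 (4 * k) 0 (by omega)
        rwa [hmod] at this
      set c := ((e.drop (4 * k)).take 4).length with hc
      have hcval : c = min 4 (e.length - 4 * k) := by
        rw [hc]
        simp
      have hc1 : 1 ≤ c ∧ c ≤ 4 := by omega
      unfold pvAltLoop
      rw [dif_pos hlen]
      have h4 : 4 * k + 4 = 4 * (k + 1) := by omega
      rw [h4, ih (k + 1) _ (by omega)]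
      have hemit : (List.range ((e.drop (4 * k)).take 4).length).flatMap
            (fun (j : Nat) => pvHex2
              (PySem.Int.band ((pvChunkWord ((e.drop (4 * k)).take 4) 0 0) >>> (24 - 8 * j)) 255))
          = (List.range' (4 * k) c).flatMap (gPair e) := by
        rw [List.range'_eq_map_range, List.flatMap_map]
        apply List.flatMap_congr
        intro j hj
        have hjc : j < c := by rw [hc]; exact List.mem_range.mp hj
        have hdiv : (4 * k + j) / 4 = k := by omega
        have hmod4 : (4 * k + j) % 4 = j := by omega
        have hsh : 24 - 8 * j = 24 - j * 8 := by omega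
        have hByte : gByte e (4 * k + j)
            = PySem.Int.band ((pvChunkWord ((e.drop (4 * k)).take 4) 0 0) >>> (24 - 8 * j)) 255 := by
          rw [gByte, hdiv, hmod4, hword, hsh, Nat.min_comm]
        obtain ⟨hge, hlt⟩ := byte_bounds ((pvChunkWord ((e.drop (4 * k)).take 4) 0 0) >>> (24 - 8 * j))
        set o := PySem.Int.band ((pvChunkWord ((e.drop (4 * k)).take 4) 0 0) >>> (24 - 8 * j)) 255 with ho
        have hm : o = ((o.toNat : Nat) : Int) := by omega
        have hmlt : o.toNat < 256 := by omega
        rw [gPair, hByte, hm, hex_pair o.toNat hmlt]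
      rw [hemit, List.append_assoc]
      congr 1
      have hsplit : List.range' (4 * k) c ++ List.range' (4 * k + c) (e.length - 4 * (k + 1))
          = List.range' (4 * k) (e.length - 4 * k) := by
        have := @List.range'_append (4 * k) c (e.length - 4 * (k + 1)) 1
        simp only [one_mul] at this
        rw [this]
        congr 1
        omega
      rw [← hsplit, List.flatMap_append]
      rcases (by omega : c = 4 ∨ e.length - 4 * (k + 1) = 0) with h4c | h0
      · have hx : 4 * k + c = 4 * (k + 1) := by omega
        rw [hx]
      · rw [h0]
        simp
    · have h0 : e.length - 4 * k = 0 := by omega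
      unfold pvAltLoop
      rw [dif_neg hlen, h0]
      simp

-- ===== VERDICT (by name: the statement is the Claim_ definition above) =====
theorem get_jiami_spec : Claim_equal_get_jiami := by
  intro e _
  unfold Spec_get_jiami get_jiami get_jiami_alt
  congr 1
  rw [pvRead_eq e _ e.length 0 [] (by omega)]
  have halt := altLoop_eq e e.length 0 [] (by omega)
  simp only [Nat.mul_zero, Nat.sub_zero, List.nil_append] at halt ⊢
  rw [halt]
  apply List.flatMap_congr
  intro u hu
  have hT := pvBuild_getD e e.length 0 (List.replicate (e.length * 2) 0) (u >>> 2)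
    (by omega) (by simp [Nat.mul_comm])
  rw [(by norm_num : 2 * 0 = 0)] at hT
  have hrep : (List.replicate (e.length * 2) (0 : Int)).getD (u >>> 2) 0 = 0 := by simp
  rw [hrep] at hT
  have hu2 : u >>> 2 = u / 4 := by simp [Nat.shiftRight_eq_div_pow]
  rw [hu2] at hT
  have hmax : max 0 (4 * (u / 4)) = 4 * (u / 4) := by omega
  rw [hmax] at hT
  unfold tPair gPair gByte
  rw [hu2, hT]
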